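-- pv_equiv track=rewrite | github.com/Kinglo25/AdventOfCode | 2015/day20/solution.py | lowest_house_number
-- ===== SOURCE A (Python) =====
-- def lowest_house_number(n):
--     limit = n // 10
--     houses = [0] * limit
--     for elf in range(1, limit):
--         for i in range(elf, min(elf * 50 + 1, limit), elf):
--             houses[i] += elf * 11
--     for i, presents in enumerate(houses):
--         if presents >= n:
--             return i
-- ===== SOURCE B (Python) =====
-- def lowest_house_number(n):
--     limit = n // 10
--     for h in range(limit):
--         presents = 0
--         for q in range(1, 51):
--             if h % q == 0:
--                 presents += 11 * (h // q)
--         if presents >= n: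
--             return h
--     return None
-- ===== Notes on version B (the rewrite author's own statement) =====
-- stated objective: alternative
-- what changed: Replaces A's elf sieve over a preallocated houses array (each elf marks its first 50 multiples) by a direct per-house present count that sums the contribution of elf h//q over the quotients q=1..50 dividing h, scanning houses in order with O(1) extra memory.
import Mathlib
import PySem

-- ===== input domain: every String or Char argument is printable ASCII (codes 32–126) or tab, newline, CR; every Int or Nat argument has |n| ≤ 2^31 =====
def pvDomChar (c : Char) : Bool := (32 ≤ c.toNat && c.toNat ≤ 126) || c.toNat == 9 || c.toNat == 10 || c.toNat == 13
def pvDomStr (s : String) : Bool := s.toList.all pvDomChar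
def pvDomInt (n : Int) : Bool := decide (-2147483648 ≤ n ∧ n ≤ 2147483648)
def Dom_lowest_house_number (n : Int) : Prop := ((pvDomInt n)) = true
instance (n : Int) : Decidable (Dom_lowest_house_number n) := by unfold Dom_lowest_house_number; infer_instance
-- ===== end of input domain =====

-- B replaces A's elf sieve over a houses array by a direct per-house present count
-- (summing each elf's contribution over the quotients q = 1..50 that divide h); alternative decomposition, O(1) extra memory.


-- ===== PORT A =====
-- houses[i] += elf*11 : the index is always in range here, so pySetD/pyGetD are exact
def lowest_house_number (n : Int) : Option Int :=
  let limit := PySem.Int.floordiv n 10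
  let houses : List Int := List.replicate limit.toNat 0
  let houses := (PySem.List.pyRange 1 limit 1).foldl (fun hs elf =>
      (PySem.List.pyRange elf (min (elf * 50 + 1) limit) elf).foldl
        (fun hs i => PySem.List.pySetD hs i (PySem.List.pyGetD hs i 0 + elf * 11)) hs) houses
  (PySem.List.enumerate houses).findSome? (fun p => if p.2 ≥ n then some p.1 else none)

-- ===== PORT B =====
def lowest_house_number_alt (n : Int) : Option Int :=
  let limit := PySem.Int.floordiv n 10
  (PySem.List.pyRange 0 limit 1).findSome? (fun h =>
    let presents := (PySem.List.pyRange 1 51 1).foldl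
      (fun acc q => if PySem.Int.mod h q = 0 then acc + 11 * PySem.Int.floordiv h q else acc) 0
    if presents ≥ n then some h else none)

-- ===== PRECONDITION & SPEC =====
def Spec_lowest_house_number (n : Int) (out : Option Int) : Prop := out = lowest_house_number_alt n
instance (n : Int) (out : Option Int) : Decidable (Spec_lowest_house_number n out) := by unfold Spec_lowest_house_number; infer_instance

-- ===== CLAIM (what is proved, stated in full; the proofs are below) =====
def Claim_equal_lowest_house_number : Prop := ∀ (n : Int), Dom_lowest_house_number n → Spec_lowest_house_number n (lowest_house_number n)

-- ===== LEMMAS AND PROOFS =====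

-- B's present count for house h (the inner fold of lowest_house_number_alt)
def pvP (h : Int) : Int :=
  (PySem.List.pyRange 1 51 1).foldl
    (fun acc q => if PySem.Int.mod h q = 0 then acc + 11 * PySem.Int.floordiv h q else acc) 0

theorem pvNodup_pyRange_pos (a b s : Int) (hs : 0 < s) : (PySem.List.pyRange a b s).Nodup := by
  rw [PySem.List.pyRange_of_pos a b hs]
  refine List.Nodup.map ?_ List.nodup_range
  intro x y h
  have : a + s * (x:Int) = a + s * (y:Int) := h
  have hxy : (x:Int) = y :=
    mul_left_cancel₀ (by omega : s ≠ 0) (by omega : s * (x:Int) = s * y)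
  exact_mod_cast hxy

theorem pvLen_inner (c : Int) (ids : List Int) (hs : List Int) :
    ((ids.foldl (fun hs i => PySem.List.pySetD hs i (PySem.List.pyGetD hs i 0 + c)) hs).length)
      = hs.length := by
  induction ids generalizing hs with
  | nil => rfl
  | cons i t ih => simp [List.foldl_cons, ih, PySem.List.length_pySetD]

theorem pvGetD_zero_of_ge (xs : List Int) (j : Int) (h : (xs.length:Int) ≤ j) :
    PySem.List.pyGetD xs j 0 = 0 := by
  apply PySem.List.pyGetD_of_none
  rw [PySem.List.pyGet?_eq_none_iff]
  simp [PySem.Raise.InRange]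
  omega

theorem pvGetD_setD (hs : List Int) (i j v : Int) (hi0 : 0 ≤ i) (hi : i < (hs.length:Int))
    (hj0 : 0 ≤ j) :
    PySem.List.pyGetD (PySem.List.pySetD hs i v) j 0
      = if j = i then v else PySem.List.pyGetD hs j 0 := by
  rw [PySem.List.pySetD_of_nonneg hs v hi0]
  by_cases hjl : j < (hs.length:Int)
  · rw [PySem.List.pyGetD_eq_getElem _ _ hj0 (by simpa using hjl),
        PySem.List.pyGetD_eq_getElem _ _ hj0 hjl]
    rw [List.getElem_set]
    by_cases hji : j = i
    · simp [hji]
    · have : i.toNat ≠ j.toNat := by omega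
      simp [this, hji]
  · have h1 : PySem.List.pyGetD (hs.set i.toNat v) j 0 = 0 :=
      pvGetD_zero_of_ge _ _ (by simp; omega)
    have h2 : PySem.List.pyGetD hs j 0 = 0 := pvGetD_zero_of_ge _ _ (by omega)
    have hji : j ≠ i := by omega
    simp [h1, h2, hji]

theorem pvInner_get (c : Int) (ids : List Int) (hs : List Int) (j : Int)
    (hnd : ids.Nodup) (hj0 : 0 ≤ j) (hin : ∀ i ∈ ids, 0 ≤ i ∧ i < (hs.length : Int)) :
    PySem.List.pyGetD
      (ids.foldl (fun hs i => PySem.List.pySetD hs i (PySem.List.pyGetD hs i 0 + c)) hs) j 0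
      = PySem.List.pyGetD hs j 0 + (if j ∈ ids then c else 0) := by
  induction ids generalizing hs with
  | nil => simp
  | cons i t ih =>
    simp only [List.foldl_cons]
    obtain ⟨hi0, hil⟩ := hin i (by simp)
    have hnd' := (List.nodup_cons.mp hnd)
    rw [ih (PySem.List.pySetD hs i (PySem.List.pyGetD hs i 0 + c)) hnd'.2
        (fun x hx => by have := hin x (by simp [hx]); simpa [PySem.List.length_pySetD] using this)]
    rw [pvGetD_setD hs i j _ hi0 hil hj0]
    by_cases hji : j = i
    · subst hji
      simp [hnd'.1]
    · simp only [List.mem_cons, hji, false_or]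
      by_cases hjt : j ∈ t <;> simp [hjt]

theorem pvOuter_get (L : Int) (E : List Int) (hs : List Int)
    (hlen : hs.length = L.toNat) (hE : ∀ e ∈ E, 1 ≤ e) (j : Int) (hj0 : 0 ≤ j) :
    PySem.List.pyGetD
      (E.foldl (fun hs elf =>
        (PySem.List.pyRange elf (min (elf * 50 + 1) L) elf).foldl
          (fun hs i => PySem.List.pySetD hs i (PySem.List.pyGetD hs i 0 + elf * 11)) hs) hs) j 0
      = PySem.List.pyGetD hs j 0
        + (E.map (fun e => if j ∈ PySem.List.pyRange e (min (e * 50 + 1) L) e then e * 11 else 0)).sum := by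
  induction E generalizing hs with
  | nil => simp
  | cons e E' ih =>
    have he : (1:Int) ≤ e := hE e (by simp)
    have hepos : (0:Int) < e := by omega
    simp only [List.foldl_cons]
    set hs' := (PySem.List.pyRange e (min (e * 50 + 1) L) e).foldl
        (fun hs i => PySem.List.pySetD hs i (PySem.List.pyGetD hs i 0 + e * 11)) hs with hhs'
    have hlen' : hs'.length = L.toNat := by
      rw [hhs', pvLen_inner (e*11)]
      exact hlen
    rw [ih hs' hlen' (fun x hx => hE x (by simp [hx]))]
    rw [pvInner_get (e*11) _ hs j (pvNodup_pyRange_pos _ _ _ hepos) hj0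
      (fun i hi => by
        rw [PySem.List.mem_pyRange_iff_of_pos hepos] at hi
        obtain ⟨h1, h2, -⟩ := hi
        omega)]
    simp only [List.map_cons, List.sum_cons]
    ring

theorem pvLen_outer (L : Int) (E : List Int) (hs : List Int) :
    ((E.foldl (fun hs elf =>
        (PySem.List.pyRange elf (min (elf * 50 + 1) L) elf).foldl
          (fun hs i => PySem.List.pySetD hs i (PySem.List.pyGetD hs i 0 + elf * 11)) hs) hs).length)
      = hs.length := by
  induction E generalizing hs with
  | nil => rfl
  | cons e E' ih => simp only [List.foldl_cons]; rw [ih, pvLen_inner (e*11)]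

theorem pvKey (J m : ℕ) (hJ : 1 ≤ J) (hm : J ≤ m) :
    ∑ k ∈ Finset.range m, (if ((1+k) ∣ J ∧ 1+k ≤ J ∧ J ≤ 50*(1+k)) then ((1+k : ℕ):Int)*11 else 0)
    = ∑ k ∈ Finset.range 50, (if (1+k) ∣ J then (11:Int) * ((J/(1+k) : ℕ):Int) else 0) := by
  rw [← Finset.sum_filter, ← Finset.sum_filter]
  refine Finset.sum_nbij' (fun k => J/(1+k) - 1) (fun q => J/(1+q) - 1) ?_ ?_ ?_ ?_ ?_
  · intro k hk
    simp only [Finset.mem_filter, Finset.mem_range] at hk ⊢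
    obtain ⟨hkm, hdvd, hle, h50⟩ := hk
    obtain ⟨c, hc⟩ := hdvd
    have hc1 : 1 ≤ c := by nlinarith
    have hq : J / (1+k) = c := by rw [hc]; exact Nat.mul_div_cancel_left c (by omega)
    have hc50 : c ≤ 50 := by nlinarith
    refine ⟨by omega, ?_⟩
    have : 1 + (J/(1+k) - 1) = c := by omega
    rw [this, hc]
    exact Dvd.intro_left _ rfl
  · intro q hq
    simp only [Finset.mem_filter, Finset.mem_range] at hq ⊢
    obtain ⟨hq50, hdvd⟩ := hq
    obtain ⟨c, hc⟩ := hdvd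
    have hc1 : 1 ≤ c := by nlinarith
    have he : J / (1+q) = c := by rw [hc]; exact Nat.mul_div_cancel_left c (by omega)
    have hcJ : c ≤ J := by nlinarith
    have hJ50 : J ≤ 50 * c := by nlinarith
    have h1 : 1 + (J/(1+q) - 1) = c := by omega
    refine ⟨by omega, ?_, by omega, by omega⟩
    rw [h1, hc]
    exact dvd_mul_left c (1+q)
  · intro k hk
    dsimp only
    simp only [Finset.mem_filter, Finset.mem_range] at hk
    obtain ⟨hkm, hdvd, hle, h50⟩ := hk
    obtain ⟨c, hc⟩ := hdvd
    have hc1 : 1 ≤ c := by nlinarith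
    have hq : J / (1+k) = c := by rw [hc]; exact Nat.mul_div_cancel_left c (by omega)
    have h1 : 1 + (J/(1+k) - 1) = c := by omega
    rw [h1]
    have : J / c = 1 + k := by rw [hc, mul_comm]; exact Nat.mul_div_cancel_left _ (by omega)
    omega
  · intro q hq
    dsimp only
    simp only [Finset.mem_filter, Finset.mem_range] at hq
    obtain ⟨hq50, hdvd⟩ := hq
    obtain ⟨c, hc⟩ := hdvd
    have hc1 : 1 ≤ c := by nlinarith
    have he : J / (1+q) = c := by rw [hc]; exact Nat.mul_div_cancel_left c (by omega)
    have h1 : 1 + (J/(1+q) - 1) = c := by omega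
    rw [h1]
    have : J / c = 1 + q := by rw [hc, mul_comm]; exact Nat.mul_div_cancel_left _ (by omega)
    omega
  · intro k hk
    dsimp only
    simp only [Finset.mem_filter, Finset.mem_range] at hk
    obtain ⟨hkm, hdvd, hle, h50⟩ := hk
    obtain ⟨c, hc⟩ := hdvd
    have hc1 : 1 ≤ c := by nlinarith
    have hq : J / (1+k) = c := by rw [hc]; exact Nat.mul_div_cancel_left c (by omega)
    have h1 : 1 + (J/(1+k) - 1) = c := by omega
    rw [h1]
    have : J / c = 1 + k := by rw [hc, mul_comm]; exact Nat.mul_div_cancel_left _ (by omega)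
    rw [this]
    push_cast
    ring

theorem pvSum_pyRange_one (a b : Int) (f : Int → Int) :
    ((PySem.List.pyRange a b 1).map f).sum = ∑ k ∈ Finset.range (b-a).toNat, f (a + k) := by
  rw [PySem.List.pyRange_one, List.map_map]; rfl

theorem pvP_eq_sum (j : Int) :
    pvP j = ((PySem.List.pyRange 1 51 1).map
      (fun q => if PySem.Int.mod j q = 0 then 11 * PySem.Int.floordiv j q else 0)).sum := by
  unfold pvP
  rw [PySem.List.foldl_congr_mem _ _
      (fun acc q => acc + (if PySem.Int.mod j q = 0 then 11 * PySem.Int.floordiv j q else 0)) 0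
      (fun acc x _ => by by_cases h : PySem.Int.mod j x = 0 <;> simp [h])]
  rw [PySem.List.foldl_add]
  simp

theorem pvSum_eq_P (L j : Int) (h0 : 0 ≤ j) (hjL : j < L) :
    ((PySem.List.pyRange 1 L 1).map
        (fun e => if j ∈ PySem.List.pyRange e (min (e * 50 + 1) L) e then e * 11 else 0)).sum
      = pvP j := by
  rw [pvP_eq_sum]
  rw [List.map_congr_left (g := fun e => if (e ∣ j ∧ e ≤ j ∧ j ≤ 50 * e) then e * 11 else 0)
      (fun e he => by
        rw [PySem.List.mem_pyRange_one] at he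
        have hepos : (0:Int) < e := by omega
        have hmem : (j ∈ PySem.List.pyRange e (min (e * 50 + 1) L) e)
            ↔ (e ∣ j ∧ e ≤ j ∧ j ≤ 50 * e) := by
          rw [PySem.List.mem_pyRange_iff_of_pos hepos]
          constructor
          · rintro ⟨h1, h2, h3⟩
            have : e ∣ j := by
              have := dvd_add h3 (dvd_refl e); simpa using this
            exact ⟨this, h1, by omega⟩
          · rintro ⟨h1, h2, h3⟩
            exact ⟨h2, by omega, dvd_sub h1 (dvd_refl e)⟩
        simp only [hmem])]
  rw [List.map_congr_left
      (f := fun q => if PySem.Int.mod j q = 0 then 11 * PySem.Int.floordiv j q else 0)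
      (g := fun q => if q ∣ j then 11 * (j / q) else 0)
      (fun q hq => by
        rw [PySem.List.mem_pyRange_one] at hq
        dsimp only
        by_cases hd : PySem.Int.mod j q = 0
        · have hdvd : q ∣ j := (PySem.Int.mod_eq_zero_iff_dvd j q).mp hd
          rw [if_pos hd, if_pos hdvd, PySem.Int.floordiv_eq_ediv_of_pos (by omega)]
        · rw [if_neg hd, if_neg (fun h => hd ((PySem.Int.mod_eq_zero_iff_dvd j q).mpr h))])]
  rw [pvSum_pyRange_one, pvSum_pyRange_one]
  by_cases hj : j = 0
  · subst hj
    rw [Finset.sum_eq_zero (fun k _ => if_neg (fun hcon => by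
          have := hcon.2.1; omega)),
        Finset.sum_eq_zero (fun k _ => by simp)]
  · obtain ⟨J, rfl⟩ : ∃ J : ℕ, j = (J:Int) := ⟨j.toNat, by omega⟩
    have hJ1 : 1 ≤ J := by omega
    have hm : J ≤ (L - 1).toNat := by omega
    have lhs_eq : ∀ k : ℕ,
        (if ((1 + (k:Int)) ∣ (J:Int) ∧ 1 + (k:Int) ≤ (J:Int) ∧ (J:Int) ≤ 50 * (1 + (k:Int)))
          then (1 + (k:Int)) * 11 else 0)
        = (if ((1+k) ∣ J ∧ 1+k ≤ J ∧ J ≤ 50*(1+k)) then ((1+k : ℕ):Int)*11 else 0) := by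
      intro k
      have hcast : (1 + (k:Int)) = ((1+k : ℕ):Int) := by push_cast; ring
      rw [hcast]
      refine if_congr ?_ rfl rfl
      rw [Int.natCast_dvd_natCast]
      constructor
      · rintro ⟨h1, h2, h3⟩; exact ⟨h1, by omega, by omega⟩
      · rintro ⟨h1, h2, h3⟩; exact ⟨h1, by omega, by omega⟩
    have rhs_eq : ∀ k : ℕ,
        (if (1 + (k:Int)) ∣ (J:Int) then 11 * ((J:Int) / (1 + (k:Int))) else 0)
        = (if (1+k) ∣ J then (11:Int) * ((J/(1+k) : ℕ):Int) else 0) := by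
      intro k
      have hcast : (1 + (k:Int)) = ((1+k : ℕ):Int) := by push_cast; ring
      simp only [hcast, Int.natCast_dvd_natCast, ← Int.natCast_div]
    calc ∑ k ∈ Finset.range (L - 1).toNat,
            (if ((1 + (k:Int)) ∣ (J:Int) ∧ 1 + (k:Int) ≤ (J:Int) ∧ (J:Int) ≤ 50 * (1 + (k:Int)))
              then (1 + (k:Int)) * 11 else 0)
        = ∑ k ∈ Finset.range (L - 1).toNat,
            (if ((1+k) ∣ J ∧ 1+k ≤ J ∧ J ≤ 50*(1+k)) then ((1+k : ℕ):Int)*11 else 0) :=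
          Finset.sum_congr rfl (fun k _ => lhs_eq k)
      _ = ∑ k ∈ Finset.range 50, (if (1+k) ∣ J then (11:Int) * ((J/(1+k) : ℕ):Int) else 0) :=
          pvKey J _ hJ1 hm
      _ = ∑ k ∈ Finset.range ((51:Int) - 1).toNat,
            (if (1 + (k:Int)) ∣ (J:Int) then 11 * ((J:Int) / (1 + (k:Int))) else 0) := by
          norm_num
          exact Finset.sum_congr rfl (fun k _ => (rhs_eq k).symm)

theorem pvFindSome_congr {α β : Type} (l : List α) (f g : α → Option β)
    (h : ∀ x ∈ l, f x = g x) : l.findSome? f = l.findSome? g := by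
  induction l with
  | nil => rfl
  | cons x t ih =>
    simp only [List.findSome?_cons, h x (by simp)]
    cases g x with
    | none => exact ih (fun y hy => h y (by simp [hy]))
    | some b => rfl

-- ===== VERDICT (by name: the statement is the Claim_ definition above) =====
theorem lowest_house_number_spec : Claim_equal_lowest_house_number := by
  intro n _
  show lowest_house_number n = lowest_house_number_alt n
  simp only [lowest_house_number, lowest_house_number_alt]
  set L := PySem.Int.floordiv n 10 with hL
  set hs1 := (PySem.List.pyRange 1 L 1).foldl (fun hs elf =>
      (PySem.List.pyRange elf (min (elf * 50 + 1) L) elf).foldl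
        (fun hs i => PySem.List.pySetD hs i (PySem.List.pyGetD hs i 0 + elf * 11)) hs)
      (List.replicate L.toNat 0) with hhs1
  have hlen1 : hs1.length = L.toNat := by
    rw [hhs1, pvLen_outer]; simp
  have hget : ∀ j : Int, 0 ≤ j → j < L → PySem.List.pyGetD hs1 j 0 = pvP j := by
    intro j hj0 hjL
    rw [hhs1, pvOuter_get L _ _ (by simp)
        (fun e hee => by rw [PySem.List.mem_pyRange_one] at hee; omega) j hj0]
    rw [pvSum_eq_P L j hj0 hjL]
    have hjr : PySem.List.pyGetD (List.replicate L.toNat (0:Int)) j 0 = 0 := by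
      by_cases hlt : j < (L.toNat : Int)
      · rw [PySem.List.pyGetD_eq_getElem _ _ hj0 (by simpa using hlt)]
        simp
      · exact pvGetD_zero_of_ge _ _ (by simp; omega)
    rw [hjr]; ring
  rw [PySem.List.enumerate_eq_map_pyRange hs1 0, List.findSome?_map]
  have hrange : PySem.List.pyRange 0 (PySem.List.len hs1) 1 = PySem.List.pyRange 0 L 1 := by
    rw [PySem.List.len_eq, hlen1]
    by_cases h0 : 0 ≤ L
    · congr 1; omega
    · rw [PySem.List.pyRange_one_eq_nil (by omega), PySem.List.pyRange_one_eq_nil (by omega)]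
  rw [hrange]
  refine pvFindSome_congr _ _ _ ?_
  intro j hj
  rw [PySem.List.mem_pyRange_one] at hj
  simp only [Function.comp]
  rw [hget j hj.1 hj.2]
  rfl
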